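-- pv_equiv track=rewrite | github.com/lossless-group/lossless-ai-labs | recraft/generate-banner-images-recraft.py | update_banner_image_in_frontmatter
-- ===== SOURCE A (Python) =====
-- BANNER_FIELD = 'banner_image'
--
-- def update_banner_image_in_frontmatter(frontmatter, banner_url):
--     """
--     Inserts or updates the 'banner_image' field in the YAML frontmatter string.
--     Preserves all other fields and formatting.
--     Returns the updated frontmatter string.
--     """
--     lines = frontmatter.split('\n')
--     found = False
--     new_lines = []
--     for line in lines:
--         if line.startswith(BANNER_FIELD + ":"):
--             # Replace the existing banner_image line
--             new_lines.append(f"{BANNER_FIELD}: {banner_url}")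
--             found = True
--         else:
--             new_lines.append(line)
--     if not found:
--         # Insert just before the closing '---' (if present), else at end
--         for i in range(len(new_lines)-1, -1, -1):
--             if new_lines[i].strip() == '---':
--                 new_lines.insert(i, f"{BANNER_FIELD}: {banner_url}")
--                 break
--         else:
--             new_lines.append(f"{BANNER_FIELD}: {banner_url}")
--     return '\n'.join(new_lines)
-- ===== SOURCE B (Python) =====
-- BANNER_FIELD = 'banner_image'
--
-- def update_banner_image_in_frontmatter(frontmatter, banner_url):
--     """Single fused reverse pass: builds the result back-to-front, replacing
--     banner lines and recording the insertion slot at the first fence it meets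
--     (= the last '---' line of the original), so no separate insertion scan is
--     needed."""
--     field = f"{BANNER_FIELD}: {banner_url}"
--     key = BANNER_FIELD + ':'
--     out = []            # result lines in reverse order
--     found = False
--     fence_at = None     # slot in `out` where `field` must go if nothing was found
--     for line in reversed(frontmatter.split('\n')):
--         out.append(field if line.startswith(key) else line)
--         if line.startswith(key):
--             found = True
--         elif fence_at is None and line.strip() == '---':
--             fence_at = len(out)
--     if not found:
--         out.insert(0 if fence_at is None else fence_at, field)
--     out.reverse()
--     return '\n'.join(out)
-- ===== Notes on version B (the rewrite author's own statement) =====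
-- stated objective: alternative
-- what changed: A makes a forward flag-carrying replacement pass and then a second backward index loop with list.insert to place the field before the last '---'; B builds the result back-to-front in ONE fused reverse pass that replaces banner lines and records the insertion slot at the first fence it meets (the last fence of the original), then splices and reverses.
import Mathlib
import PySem

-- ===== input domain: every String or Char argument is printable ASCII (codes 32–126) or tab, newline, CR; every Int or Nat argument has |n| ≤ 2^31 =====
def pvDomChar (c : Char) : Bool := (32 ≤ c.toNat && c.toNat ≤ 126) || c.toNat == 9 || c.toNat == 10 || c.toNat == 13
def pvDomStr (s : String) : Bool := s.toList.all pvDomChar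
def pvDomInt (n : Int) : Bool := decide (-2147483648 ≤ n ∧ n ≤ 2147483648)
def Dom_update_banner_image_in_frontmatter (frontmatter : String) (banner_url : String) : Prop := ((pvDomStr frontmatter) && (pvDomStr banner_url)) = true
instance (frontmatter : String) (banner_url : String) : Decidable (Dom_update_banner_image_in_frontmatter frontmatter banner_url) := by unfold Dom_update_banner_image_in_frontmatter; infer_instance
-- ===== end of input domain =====

-- B replaces A's two staged passes (forward flag loop, then a backward index loop with
-- list.insert) by ONE fused reverse pass that builds the output back-to-front and records
-- the insertion slot at the first fence it meets (alternative decomposition; same cost).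


-- ===== PORT A =====
-- the for-else loop "for i in range(len(new_lines)-1, -1, -1): … break / else append"
def pvAInsertLoop (nl : List (List Char)) (field : List Char) (i : Int) : List (List Char) :=
  if i < 0 then nl ++ [field]                                     -- for-else: append at end
  else if PySem.Chars.strip (PySem.List.pyGetD nl i []) = "---".toList then
    PySem.List.insert nl i field
  else pvAInsertLoop nl field (i - 1)
termination_by (i + 1).toNat
decreasing_by omega

def update_banner_image_in_frontmatter (frontmatter : String) (banner_url : String) : String :=
  let lines := PySem.Chars.splitOn frontmatter.toList "\n".toList
  let field := "banner_image: ".toList ++ banner_url.toList       -- f"{BANNER_FIELD}: {banner_url}"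
  -- for line in lines: … (state = (found, new_lines))
  let st := lines.foldl (fun (st : Bool × List (List Char)) line =>
      if PySem.Chars.startswith line "banner_image:".toList then (true, st.2 ++ [field])
      else (st.1, st.2 ++ [line])) (false, [])
  let new_lines := if st.1 then st.2 else pvAInsertLoop st.2 field ((st.2.length : Int) - 1)
  String.ofList (PySem.Chars.join "\n".toList new_lines)

-- ===== PORT B =====
-- the body of B's single "for line in reversed(frontmatter.split('\n'))" loop;
-- state = (out, found, fence_at)
def pvBStep (field : List Char) (st : List (List Char) × Bool × Option Nat)
    (line : List Char) : List (List Char) × Bool × Option Nat :=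
  let out := st.1 ++ [if PySem.Chars.startswith line "banner_image:".toList then field else line]
  if PySem.Chars.startswith line "banner_image:".toList then (out, true, st.2.2)
  else if st.2.2 = none ∧ PySem.Chars.strip line = "---".toList then (out, st.2.1, some out.length)
  else (out, st.2.1, st.2.2)

def update_banner_image_in_frontmatter_alt (frontmatter : String) (banner_url : String) : String :=
  let field := "banner_image: ".toList ++ banner_url.toList
  let st := ((PySem.Chars.splitOn frontmatter.toList "\n".toList).reverse).foldl
      (pvBStep field) ([], false, none)
  -- if not found: out.insert(0 if fence_at is None else fence_at, field)
  let out := if st.2.1 then st.1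
    else PySem.List.insert st.1 (match st.2.2 with | none => (0 : Int) | some k => (k : Int)) field
  String.ofList (PySem.Chars.join "\n".toList out.reverse)

-- ===== PRECONDITION & SPEC =====
def Spec_update_banner_image_in_frontmatter (frontmatter : String) (banner_url : String) (out : String) : Prop := out = update_banner_image_in_frontmatter_alt frontmatter banner_url
instance (frontmatter : String) (banner_url : String) (out : String) : Decidable (Spec_update_banner_image_in_frontmatter frontmatter banner_url out) := by unfold Spec_update_banner_image_in_frontmatter; infer_instance

-- ===== CLAIM (what is proved, stated in full; the proofs are below) =====
def Claim_equal_update_banner_image_in_frontmatter : Prop := ∀ (frontmatter : String) (banner_url : String), Dom_update_banner_image_in_frontmatter frontmatter banner_url → Spec_update_banner_image_in_frontmatter frontmatter banner_url (update_banner_image_in_frontmatter frontmatter banner_url)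

-- ===== LEMMAS AND PROOFS =====

-- A's flag loop computes (found = any, new_lines = conditional map)
theorem pvFoldA (p : List Char → Bool) (field : List Char) :
    ∀ (lines : List (List Char)) (b : Bool) (acc : List (List Char)),
    lines.foldl (fun (st : Bool × List (List Char)) line =>
        if p line then (true, st.2 ++ [field]) else (st.1, st.2 ++ [line])) (b, acc)
      = (b || lines.any p, acc ++ lines.map (fun l => if p l then field else l)) := by
  intro lines
  induction lines with
  | nil => intro b acc; simp
  | cons l rest ih =>
    intro b acc
    by_cases h : p l = true <;> simp [h, ih]

-- pvBStep, with its two tests abstracted as predicates q (banner line) and s (fence line)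
def pvStepG (q s : List Char → Bool) (field : List Char)
    (st : List (List Char) × Bool × Option Nat) (line : List Char) :
    List (List Char) × Bool × Option Nat :=
  let out := st.1 ++ [if q line then field else line]
  if q line then (out, true, st.2.2)
  else if st.2.2 = none ∧ s line then (out, st.2.1, some out.length)
  else (out, st.2.1, st.2.2)

theorem pvBStep_eq (field : List Char) :
    pvBStep field = pvStepG (fun l => PySem.Chars.startswith l "banner_image:".toList)
      (fun l => decide (PySem.Chars.strip l = "---".toList)) field := by
  funext st line
  simp [pvBStep, pvStepG]

-- B's fused reverse loop computes (conditional map, any, slot just after the first fence)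
theorem pvFoldG (q s : List Char → Bool) (field : List Char) :
    ∀ (r : List (List Char)) (out : List (List Char)) (found : Bool) (fence : Option Nat),
    r.foldl (pvStepG q s field) (out, found, fence)
      = (out ++ r.map (fun l => if q l then field else l),
         found || r.any q,
         match fence with
         | some k => some k
         | none => (r.findIdx? (fun l => !q l && s l)).map (fun i => out.length + i + 1)) := by
  intro r
  induction r with
  | nil => intro out found fence; cases fence <;> simp
  | cons l rest ih =>
    intro out found fence
    rw [List.foldl_cons, List.map_cons, List.any_cons, List.findIdx?_cons]
    by_cases hq : q l = true
    · rw [show pvStepG q s field (out, found, fence) l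
          = (out ++ [field], true, fence) by simp [pvStepG, hq]]
      rw [ih]
      cases fence with
      | some k => simp [hq]
      | none =>
        cases hidx : rest.findIdx? (fun l => !q l && s l) <;> simp [hq, hidx] <;> omega
    · by_cases hf : fence = none
      · by_cases hs : s l = true
        · rw [show pvStepG q s field (out, found, fence) l
              = (out ++ [l], found, some (out.length + 1)) by simp [pvStepG, hq, hf, hs]]
          rw [ih]
          subst hf
          simp [hq, hs]
        · rw [show pvStepG q s field (out, found, fence) l
              = (out ++ [l], found, fence) by simp [pvStepG, hq, hf, hs]]
          rw [ih]
          subst hf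
          simp only [Bool.not_eq_true] at hq hs
          cases hidx : rest.findIdx? (fun l => !q l && s l) <;> simp [hq, hs, hidx] <;> omega
      · obtain ⟨k, rfl⟩ := Option.ne_none_iff_exists'.mp hf
        rw [show pvStepG q s field (out, found, some k) l
            = (out ++ [l], found, some k) by simp [pvStepG, hq]]
        rw [ih]
        simp [hq]

-- A's backward loop when no line is a fence: the for-else appends at the end
theorem pvALoopNone (lines : List (List Char)) (field : List Char)
    (h : ∀ l ∈ lines, ¬ PySem.Chars.strip l = "---".toList) :
    ∀ (n : Nat) (i : Int), (i + 1).toNat = n → i < (lines.length : Int) →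
    pvAInsertLoop lines field i = lines ++ [field] := by
  intro n
  induction n with
  | zero =>
    intro i hn hi
    rw [pvAInsertLoop, if_pos (by omega)]
  | succ m ih =>
    intro i hn hi
    rw [pvAInsertLoop]
    by_cases hneg : i < 0
    · rw [if_pos hneg]
    · rw [if_neg hneg]
      have h0 : (0 : Int) ≤ i := by omega
      have hget := PySem.List.pyGetD_eq_getElem lines ([] : List Char) h0 hi
      rw [if_neg (by rw [hget]; exact h _ (List.getElem_mem _))]
      exact ih (i - 1) (by omega) (by omega)

-- A's backward loop stops at the topmost fence index at or below its start
theorem pvALoopHit (lines : List (List Char)) (field : List Char) (t : Nat)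
    (ht : t < lines.length)
    (hfence : PySem.Chars.strip (lines[t]'ht) = "---".toList)
    (habove : ∀ (m : Nat) (hm : m < lines.length), t < m → ¬ PySem.Chars.strip (lines[m]'hm) = "---".toList) :
    ∀ (n : Nat) (i : Int), (i + 1).toNat = n → (t : Int) ≤ i → i < (lines.length : Int) →
    pvAInsertLoop lines field i = PySem.List.insert lines (t : Int) field := by
  intro n
  induction n with
  | zero => intro i hn hti hi; omega
  | succ m ih =>
    intro i hn hti hi
    rw [pvAInsertLoop, if_neg (by omega)]
    have h0 : (0 : Int) ≤ i := by omega
    have hget := PySem.List.pyGetD_eq_getElem lines ([] : List Char) h0 hi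
    by_cases heq : i = (t : Int)
    · subst heq
      rw [if_pos (by rw [hget]; simpa using hfence)]
    · have hgt : (t : Int) < i := by omega
      rw [if_neg (by rw [hget]; exact habove i.toNat (by omega) (by omega))]
      exact ih (i - 1) (by omega) (by omega) (by omega)

-- the common body, stated over the already-split line list
theorem pvMain (lines : List (List Char)) (field : List Char) :
    (let st := lines.foldl (fun (st : Bool × List (List Char)) line =>
        if PySem.Chars.startswith line "banner_image:".toList then (true, st.2 ++ [field])
        else (st.1, st.2 ++ [line])) (false, []);
     let new_lines := if st.1 then st.2 else pvAInsertLoop st.2 field ((st.2.length : Int) - 1)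
     String.ofList (PySem.Chars.join "\n".toList new_lines))
    = (let st := (lines.reverse).foldl (pvBStep field) ([], false, none);
       let out := if st.2.1 then st.1
         else PySem.List.insert st.1 (match st.2.2 with | none => (0 : Int) | some k => (k : Int)) field
       String.ofList (PySem.Chars.join "\n".toList out.reverse)) := by
  simp only []
  rw [pvFoldA (fun l => PySem.Chars.startswith l "banner_image:".toList) field lines false []]
  rw [pvBStep_eq, pvFoldG (fun l => PySem.Chars.startswith l "banner_image:".toList)
      (fun l => decide (PySem.Chars.strip l = "---".toList)) field lines.reverse [] false none]
  simp only [Bool.false_or, List.nil_append, List.length_nil, Nat.zero_add]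
  by_cases hany : lines.any (fun l => PySem.Chars.startswith l "banner_image:".toList) = true
  · rw [if_pos hany, if_pos (by rw [List.any_reverse]; exact hany)]
    rw [List.map_reverse, List.reverse_reverse]
  · have hall : ∀ l ∈ lines, PySem.Chars.startswith l "banner_image:".toList = false := by
      intro l hl
      by_contra hc
      exact hany (List.any_eq_true.mpr ⟨l, hl, by simpa using hc⟩)
    have hmap : lines.map (fun l => if PySem.Chars.startswith l "banner_image:".toList then field else l)
        = lines := by
      conv_rhs => rw [← List.map_id lines]
      refine List.map_congr_left (fun l hl => ?_)
      rw [if_neg]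
      · rfl
      · intro h; rw [hall l hl] at h; cases h
    rw [if_neg hany, if_neg (by rw [List.any_reverse]; exact hany)]
    rw [hmap, List.map_reverse, hmap]
    cases hidx : lines.reverse.findIdx? (fun l => !(PySem.Chars.startswith l "banner_image:".toList)
        && decide (PySem.Chars.strip l = "---".toList)) with
    | none =>
      have hnofence : ∀ l ∈ lines, ¬ PySem.Chars.strip l = "---".toList := by
        intro l hl
        have := List.findIdx?_eq_none_iff.mp hidx l (List.mem_reverse.mpr hl)
        rw [hall l hl] at this
        simpa using this
      rw [pvALoopNone lines field hnofence ((lines.length : Int) - 1 + 1).toNat _ rfl (by omega)]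
      simp [PySem.List.insert_zero]
    | some k =>
      obtain ⟨hk, hPk, hmin⟩ := List.findIdx?_eq_some_iff_getElem.mp hidx
      rw [List.length_reverse] at hk
      have hkr : k < lines.reverse.length := by simpa using hk
      set t := lines.length - 1 - k with hT
      have htlen : t < lines.length := by omega
      have hrev : lines.reverse[k]'hkr = lines[t]'htlen := by
        rw [List.getElem_reverse]
      have hfence : PySem.Chars.strip (lines[t]'htlen) = "---".toList := by
        rw [← hrev]
        have := hPk
        simp only [Bool.and_eq_true, Bool.not_eq_true', decide_eq_true_eq] at this
        exact this.2
      have habove : ∀ (m : Nat) (hm : m < lines.length), t < m →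
          ¬ PySem.Chars.strip (lines[m]'hm) = "---".toList := by
        intro m hm htm
        have hj : lines.length - 1 - m < k := by omega
        have hjr : lines.length - 1 - m < lines.reverse.length := by simpa using (by omega : lines.length - 1 - m < lines.length)
        have := hmin (lines.length - 1 - m) hj
        rw [List.getElem_reverse] at this
        have hmm : lines.length - 1 - (lines.length - 1 - m) = m := by omega
        simp only [hmm] at this
        simp only [Bool.and_eq_true, Bool.not_eq_true', decide_eq_true_eq, not_and] at this
        exact this (hall _ (List.getElem_mem _))
      rw [pvALoopHit lines field t htlen hfence habove ((lines.length : Int) - 1 + 1).toNat _ rfl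
          (by omega) (by omega)]
      have hins : PySem.List.insert lines (t : Int) field
          = lines.take t ++ field :: lines.drop t :=
        PySem.List.insert_natCast lines t field (by omega)
      have hinsB : PySem.List.insert lines.reverse ((k + 1 : Nat) : Int) field
          = lines.reverse.take (k + 1) ++ field :: lines.reverse.drop (k + 1) :=
        PySem.List.insert_natCast lines.reverse (k + 1) field (by simpa using hk)
      rw [hins]
      simp only [Option.map_some]
      rw [hinsB]
      rw [List.reverse_append, List.reverse_cons]
      rw [List.reverse_take, List.reverse_drop]
      simp only [List.reverse_reverse, List.length_reverse]
      have h1 : lines.length - (k + 1) = t := by omega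
      rw [h1]
      simp

-- ===== VERDICT (by name: the statement is the Claim_ definition above) =====
theorem update_banner_image_in_frontmatter_spec : Claim_equal_update_banner_image_in_frontmatter := by
  intro frontmatter banner_url _
  unfold Spec_update_banner_image_in_frontmatter
  unfold update_banner_image_in_frontmatter update_banner_image_in_frontmatter_alt
  exact pvMain (PySem.Chars.splitOn frontmatter.toList "\n".toList)
    ("banner_image: ".toList ++ banner_url.toList)
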